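-- pv_equiv track=rewrite | github.com/masterqsa/adventofcode2019 | Day24/sol.py | bioDiversity
-- ===== SOURCE A (Python) =====
-- def bioDiversity(game):
--     pos = 0
--     score = 0
--     for row in game:
--         for item in row:
--             if item == "#":
--                 score += (2 ** pos)
--             pos += 1
--     return score
-- ===== SOURCE B (Python) =====
-- def bioDiversity(game):
--     bits = "".join("1" if item == "#" else "0" for row in game for item in row)
--     if not bits:
--         return 0
--     return int(bits[::-1], 2)
-- ===== Notes on version B (the rewrite author's own statement) =====
-- stated objective: idiomatic
-- what changed: Replaces the explicit pos/score loop with 2**pos accumulation by building a bit-string ('1' per '#' cell, row-major) and parsing its reversal as a base-2 integer.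
import Mathlib
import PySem

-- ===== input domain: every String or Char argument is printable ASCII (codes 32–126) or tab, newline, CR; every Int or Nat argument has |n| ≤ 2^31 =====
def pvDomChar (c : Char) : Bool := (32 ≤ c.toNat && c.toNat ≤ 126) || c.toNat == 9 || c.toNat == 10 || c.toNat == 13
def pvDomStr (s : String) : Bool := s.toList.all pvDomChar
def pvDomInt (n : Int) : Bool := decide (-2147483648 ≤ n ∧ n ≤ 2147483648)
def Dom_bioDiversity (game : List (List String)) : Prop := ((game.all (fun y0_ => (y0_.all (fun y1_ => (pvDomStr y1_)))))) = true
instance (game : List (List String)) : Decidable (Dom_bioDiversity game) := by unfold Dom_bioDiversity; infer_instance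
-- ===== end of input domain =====

-- B builds the grid's bit-string ('1' per '#' cell, row-major), reverses it and parses it base 2,
-- instead of A's running 2**pos accumulation (objective: idiomatic).


-- ===== PORT A =====
-- state = (pos, score); 'score += 2 ** pos' then 'pos += 1', exactly A's loop order
def bioDiversity (game : List (List String)) : Int :=
  (game.foldl
    (fun st row =>
      row.foldl
        (fun (st : Int × Int) item =>
          ((st.1 + 1 : Int), if item = "#" then st.2 + 2 ^ st.1.toNat else st.2))
        st)
    ((0 : Int), (0 : Int))).2

-- ===== PORT B =====
-- the bit string: '1' for '#', '0' otherwise, row-major (the generator expression in Source B)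
def pvBits (game : List (List String)) : List Char :=
  (game.flatMap id).map (fun item => if item = "#" then '1' else '0')

-- int(s, 2) on a string of '0'/'1' (standard base-2 parse)
def pvBinVal (l : List Char) : Int :=
  l.foldl (fun a c => 2 * a + (if c = '1' then 1 else 0)) 0

def bioDiversity_alt (game : List (List String)) : Int :=
  let bits := pvBits game
  if bits.isEmpty then 0 else pvBinVal bits.reverse

-- ===== PRECONDITION & SPEC =====
def Spec_bioDiversity (game : List (List String)) (out : Int) : Prop := out = bioDiversity_alt game
instance (game : List (List String)) (out : Int) : Decidable (Spec_bioDiversity game out) := by unfold Spec_bioDiversity; infer_instance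

-- ===== CLAIM (what is proved, stated in full; the proofs are below) =====
def Claim_equal_bioDiversity : Prop := ∀ (game : List (List String)), Dom_bioDiversity game → Spec_bioDiversity game (bioDiversity game)

-- ===== LEMMAS AND PROOFS =====

-- A's nested loop over rows is the same fold over the flattened item list
theorem pvA_flatten (game : List (List String)) (st : Int × Int) :
    game.foldl
      (fun st row =>
        row.foldl
          (fun (st : Int × Int) item =>
            ((st.1 + 1 : Int), if item = "#" then st.2 + 2 ^ st.1.toNat else st.2))
          st)
      st
    = (game.flatMap id).foldl
        (fun (st : Int × Int) item =>
          ((st.1 + 1 : Int), if item = "#" then st.2 + 2 ^ st.1.toNat else st.2))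
        st := by
  induction game generalizing st with
  | nil => simp
  | cons r rs ih => simp [List.flatMap_cons, List.foldl_append, ih]

theorem pvBinVal_snoc (l : List Char) (c : Char) :
    pvBinVal (l ++ [c]) = 2 * pvBinVal l + (if c = '1' then 1 else 0) := by
  simp [pvBinVal, List.foldl_append]

-- core invariant: the pos/score loop computes score + 2^pos * (base-2 value of reversed bits)
theorem pvCore (items : List String) (p s : Int) (hp : 0 ≤ p) :
    ((items.foldl
        (fun (st : Int × Int) item =>
          ((st.1 + 1 : Int), if item = "#" then st.2 + 2 ^ st.1.toNat else st.2))
        (p, s)).2)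
    = s + 2 ^ p.toNat *
        pvBinVal ((items.map (fun item => if item = "#" then '1' else '0')).reverse) := by
  induction items generalizing p s with
  | nil => simp [pvBinVal]
  | cons x xs ih =>
      simp only [List.foldl_cons, List.map_cons, List.reverse_cons, pvBinVal_snoc]
      rw [ih (p + 1) _ (by omega)]
      have h1 : (p + 1).toNat = p.toNat + 1 := by omega
      by_cases hx : x = "#" <;> simp [hx, h1, pow_succ] <;> ring

theorem bioDiversity_spec : Claim_equal_bioDiversity := by
  intro game _
  unfold Spec_bioDiversity bioDiversity bioDiversity_alt pvBits
  rw [pvA_flatten, pvCore (game.flatMap id) 0 0 (le_refl 0)]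
  by_cases h : (game.flatMap id) = []
  · simp [h, pvBinVal]
  · rw [if_neg (by
      simp only [List.isEmpty_iff, List.map_eq_nil_iff]
      exact h)]; simp
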